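-- pv_equiv track=rewrite | github.com/void-deref/FunGP | fun_gp/utils.py | len_asn
-- ===== SOURCE A (Python) =====
-- def bytes_to_hex(byte_data:list, uppercase=True) -> str:
--     """
--     Converts an input of [list of ]bytes into the HEX-string.
--     """
--     b = bytes(byte_data)
--     fmt = '{:02X}' if uppercase else '{:02x}'
--     return ''.join(fmt.format(x) for x in b)
--
-- def len_asn(an_array:list|str) -> str:
--     """
--     Returns a length value formatted in accordance with BER-TLV requirements:
--     00-7F         - as is
--     80-FF         - 8180:81FF
--     0100- FFFF    - 820100:82FFFF
--     010000 FFFFFF - 83010000:83FFFFFF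
--     """
--     if not isinstance(an_array, str):
--         an_array = bytes_to_hex(an_array)
--
--     clean_str = ''.join(c for c in an_array if c.isalnum())
--     if len(clean_str) % 2 != 0:
--         raise ValueError(f'Input hex string has odd length ({len(clean_str)})')
--
--     str_len = len(clean_str) // 2
--
--     if str_len <= 127:
--         return f'{str_len:02x}'
--     else:
--         hex_val = hex(str_len)[2:] # trim '0x' prefix
--
--         if len(hex_val) % 2 != 0:  # prepend '0' to values like AF6 (if any)
--             hex_val = '0' + hex_val
--
--         num_bytes  = len(hex_val) // 2 # 0AF6 // 2 = 2. Two bytes are used to encode the length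
--         first_byte = 0x80 | num_bytes  # 0x80 | 2 = 82.
--         return f'{first_byte:02x}' + hex_val
-- ===== SOURCE B (Python) =====
-- def len_asn(an_array):
--     if not isinstance(an_array, str):
--         an_array = bytes(an_array).hex()
--     n = sum(1 for c in an_array if c.isalnum())
--     if n % 2 != 0:
--         raise ValueError(f'Input hex string has odd length ({n})')
--     m = n // 2
--     if m <= 127:
--         return format(m, '02x')
--     parts = []
--     while m:
--         parts.append(m & 0xFF)
--         m >>= 8
--     return format(0x80 | len(parts), '02x') + ''.join(format(b, '02x') for b in reversed(parts))
-- ===== Notes on version B (the rewrite author's own statement) =====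
-- stated objective: alternative
-- what changed: B counts alphanumeric characters in one pass instead of materialising the cleaned string, and builds the long-form BER-TLV length by peeling bytes off the integer with a divmod loop (then rendering each byte as two hex digits) instead of A's hex()-string slicing, odd-length zero-padding and len//2 arithmetic.
import Mathlib
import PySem

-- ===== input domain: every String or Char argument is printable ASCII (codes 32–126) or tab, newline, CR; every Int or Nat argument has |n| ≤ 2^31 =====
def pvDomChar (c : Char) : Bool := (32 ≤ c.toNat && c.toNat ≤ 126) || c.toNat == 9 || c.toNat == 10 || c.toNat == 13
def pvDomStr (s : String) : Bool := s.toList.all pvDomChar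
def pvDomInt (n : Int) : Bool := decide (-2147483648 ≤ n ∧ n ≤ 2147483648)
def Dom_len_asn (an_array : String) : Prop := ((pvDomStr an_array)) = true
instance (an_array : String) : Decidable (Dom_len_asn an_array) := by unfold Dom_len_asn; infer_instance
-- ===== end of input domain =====

-- B builds the long-form BER-TLV length by peeling bytes off the integer (divmod loop)
-- instead of A's hex-string slicing/padding arithmetic; objective: alternative (same cost).
-- Only the str branch of Python's `an_array: list|str` is in scope under the String signature.

-- shared port of Python's hex formatting built-ins, used by both ports:
-- hexDigits m = hex(m)[2:]  (lowercase, no padding);  fmt02x m = format(m, '02x') = f'{m:02x}'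
def hexChar (d : Nat) : Char := if d < 10 then Char.ofNat (48 + d) else Char.ofNat (87 + d)

def hexDigits (m : Nat) : List Char :=
  if _h : m < 16 then [hexChar m]
  else hexDigits (m / 16) ++ [hexChar (m % 16)]
  decreasing_by exact Nat.div_lt_self (by omega) (by omega)

def fmt02x (m : Nat) : List Char :=
  let s := hexDigits m
  if s.length < 2 then '0' :: s else s

-- ===== PORT A =====
-- (A's `raise ValueError` on an odd alnum count is excluded by Pre_len_asn below;
--  the port simply continues past it, as nothing is claimed there.)
def len_asn (an_array : String) : String :=
  let clean := an_array.toList.filter (fun c => PySem.Chars.isalnum c)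
  let strLen := clean.length / 2
  if strLen ≤ 127 then String.ofList (fmt02x strLen)
  else
    let hexVal := hexDigits strLen
    let hexVal := if hexVal.length % 2 ≠ 0 then '0' :: hexVal else hexVal
    let numBytes := hexVal.length / 2
    let firstByte := 128 ||| numBytes
    String.ofList (fmt02x firstByte ++ hexVal)

-- ===== PORT B =====
-- the `while m: parts.append(m & 0xFF); m >>= 8` loop of Source B
def bytesLE (m : Nat) : List Nat :=
  if h : m = 0 then []
  else (m % 256) :: bytesLE (m / 256)
  decreasing_by exact Nat.div_lt_self (by omega) (by omega)

def len_asn_alt (an_array : String) : String :=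
  let n := an_array.toList.foldl (fun acc c => if PySem.Chars.isalnum c then acc + 1 else acc) 0
  let m := n / 2
  if m ≤ 127 then String.ofList (fmt02x m)
  else
    let parts := bytesLE m
    String.ofList (fmt02x (128 ||| parts.length) ++ parts.reverse.flatMap fmt02x)

-- ===== PRECONDITION & SPEC =====
-- Pre_ excludes exactly the inputs with an odd number of alphanumeric characters, on which A raises ValueError.
def Pre_len_asn (an_array : String) : Prop :=
  (an_array.toList.countP (fun c => PySem.Chars.isalnum c)) % 2 = 0
instance (an_array : String) : Decidable (Pre_len_asn an_array) := by unfold Pre_len_asn; infer_instance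
def pvWitness_len_asn : String := "ab"

def Spec_len_asn (an_array : String) (out : String) : Prop := out = len_asn_alt an_array
instance (an_array : String) (out : String) : Decidable (Spec_len_asn an_array out) := by unfold Spec_len_asn; infer_instance

-- ===== CLAIM (what is proved, stated in full; the proofs are below) =====
def Claim_equal_len_asn : Prop := ∀ (an_array : String), Dom_len_asn an_array → Pre_len_asn an_array → Spec_len_asn an_array (len_asn an_array)

-- ===== LEMMAS AND PROOFS =====

theorem foldl_count_nat {α : Type} (p : α → Bool) (l : List α) (a : Nat) :
    List.foldl (fun acc x => if p x then acc + 1 else acc) a l = a + l.countP p := by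
  induction l generalizing a with
  | nil => simp
  | cons x xs ih =>
    simp only [List.foldl_cons, List.countP_cons, ih]
    by_cases h : p x
    · simp [h]; omega
    · simp [h]

theorem hexDigits_lt16 {m : Nat} (h : m < 16) : hexDigits m = [hexChar m] := by
  rw [hexDigits]; simp [h]

theorem hexDigits_ge16 {m : Nat} (h : 16 ≤ m) :
    hexDigits m = hexDigits (m / 16) ++ [hexChar (m % 16)] := by
  rw [hexDigits]; simp [Nat.not_lt.2 h]

theorem fmt02x_lt256 {b : Nat} (h : b < 256) :
    fmt02x b = [hexChar (b / 16), hexChar (b % 16)] := by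
  by_cases h16 : b < 16
  · simp [fmt02x, hexDigits_lt16 h16, Nat.div_eq_of_lt h16, Nat.mod_eq_of_lt h16]
    decide
  · have : b / 16 < 16 := by omega
    simp [fmt02x, hexDigits_ge16 (by omega : 16 ≤ b), hexDigits_lt16 this]

theorem bytesLE_zero : bytesLE 0 = [] := by rw [bytesLE]; simp

theorem bytesLE_pos {m : Nat} (h : m ≠ 0) :
    bytesLE m = (m % 256) :: bytesLE (m / 256) := by
  rw [bytesLE]; simp [h]

theorem bytesLE_lt256 {m : Nat} : ∀ b ∈ bytesLE m, b < 256 := by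
  induction m using Nat.strong_induction_on with
  | _ m ih =>
    by_cases h : m = 0
    · simp [h, bytesLE_zero]
    · rw [bytesLE_pos h]
      intro b hb
      rcases List.mem_cons.1 hb with rfl | hb
      · omega
      · exact ih (m / 256) (Nat.div_lt_self (by omega) (by omega)) b hb

-- the heart: A's padded hex string IS B's byte list rendered two digits per byte
theorem padEven_hexDigits_eq (m : Nat) (hm : 1 ≤ m) :
    (if (hexDigits m).length % 2 ≠ 0 then '0' :: hexDigits m else hexDigits m)
      = (bytesLE m).reverse.flatMap fmt02x := by
  induction m using Nat.strong_induction_on with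
  | _ m ih =>
    by_cases h256 : m < 256
    · have hq : m / 256 = 0 := Nat.div_eq_of_lt h256
      rw [bytesLE_pos (by omega), hq, bytesLE_zero]
      simp only [List.reverse_cons, List.reverse_nil, List.nil_append,
        List.flatMap_cons, List.flatMap_nil, List.append_nil]
      rw [fmt02x_lt256 (by omega : m % 256 < 256), Nat.mod_eq_of_lt h256]
      by_cases h16 : m < 16
      · rw [hexDigits_lt16 h16]
        simp [Nat.div_eq_of_lt h16, Nat.mod_eq_of_lt h16]
        decide
      · rw [hexDigits_ge16 (by omega), hexDigits_lt16 (by omega : m / 16 < 16)]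
        simp
    · -- m ≥ 256: peel the low byte on both sides
      have h16 : (16 : Nat) ≤ m := by omega
      have h16' : (16 : Nat) ≤ m / 16 := by omega
      have e1 : m / 16 / 16 = m / 256 := by omega
      have e2 : m / 16 % 16 = m % 256 / 16 := by omega
      have e3 : m % 16 = m % 256 % 16 := by omega
      have hrep : hexDigits m
          = hexDigits (m / 256) ++ [hexChar (m % 256 / 16), hexChar (m % 256 % 16)] := by
        rw [hexDigits_ge16 h16, hexDigits_ge16 h16', e1, e2, e3]
        simp
      have ihq := ih (m / 256) (Nat.div_lt_self (by omega) (by omega)) (by omega)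
      rw [bytesLE_pos (by omega : m ≠ 0)]
      simp only [List.reverse_cons, List.flatMap_append, List.flatMap_cons,
        List.flatMap_nil, List.append_nil]
      rw [← ihq, hrep, fmt02x_lt256 (by omega : m % 256 < 256)]
      simp only [List.length_append, List.length_cons, List.length_nil]
      by_cases hpar : (hexDigits (m / 256)).length % 2 ≠ 0
      · have h2 : ((hexDigits (m / 256)).length + 2) % 2 ≠ 0 := by omega
        simp only [if_pos hpar, if_pos h2, List.cons_append]
      · have h2 : ¬ ((hexDigits (m / 256)).length + 2) % 2 ≠ 0 := by omega
        simp only [if_neg hpar, if_neg h2]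

theorem flatMap_fmt02x_length (l : List Nat) (hl : ∀ b ∈ l, b < 256) :
    (l.flatMap fmt02x).length = 2 * l.length := by
  induction l with
  | nil => simp
  | cons b bs ih =>
    rw [List.flatMap_cons, List.length_append, fmt02x_lt256 (hl b (List.mem_cons_self))]
    rw [ih (fun x hx => hl x (List.mem_cons_of_mem _ hx))]
    simp; omega

-- ===== VERDICT (by name: the statement is the Claim_ definition above) =====
theorem len_asn_spec : Claim_equal_len_asn := by
  intro s _ _
  unfold Spec_len_asn len_asn len_asn_alt
  simp only [foldl_count_nat, Nat.zero_add, List.countP_eq_length_filter]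
  set m := (s.toList.filter (fun c => PySem.Chars.isalnum c)).length / 2 with hm
  by_cases hc : m ≤ 127
  · simp [hc]
  · simp only [hc, if_false]
    have hm1 : 1 ≤ m := by omega
    have hkey := padEven_hexDigits_eq m hm1
    have hlen : ((bytesLE m).reverse.flatMap fmt02x).length = 2 * (bytesLE m).length := by
      rw [flatMap_fmt02x_length _ (fun b hb => bytesLE_lt256 b (List.mem_reverse.1 hb)),
        List.length_reverse]
    have h2 : 2 * (bytesLE m).length / 2 = (bytesLE m).length := by omega
    rw [hkey, hlen, h2]
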